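-- pv_equiv track=rewrite | github.com/ehddn5252/Algorithm | 백준/Gold/2661. 좋은수열/좋은수열.py | check
-- ===== SOURCE A (Python) =====
-- def check(l):
--     if len(l) == 1 or len(l) == 0:
--         return True
--     mid = len(l) // 2
--     if len(l) % 2 == 1:
--         for i in range(mid):
--             if l[mid + i + 1] != l[i + 1]:
--                 return check(l[3:])
--     else:
--         for i in range(mid):
--             if l[mid + i] != l[i]:
--                 return check(l[2:])
--     return False
-- ===== SOURCE B (Python) =====
-- def check(l):
--     start = 0
--     while True:
--         n = len(l) - start
--         if n <= 1:
--             return True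
--         mid = n // 2
--         if n % 2 == 1:
--             if l[start + 1:start + mid + 1] == l[start + mid + 1:start + n]:
--                 return False
--             start += 3
--         else:
--             if l[start:start + mid] == l[start + mid:start + n]:
--                 return False
--             start += 2
-- ===== Notes on version B (the rewrite author's own statement) =====
-- stated objective: faster
-- what changed: Replaces A's recursion that materialises a sliced copy l[3:]/l[2:] of the whole remaining list at every step with a single-offset iterative loop over the original list, deciding each step by one slice-equality comparison of the two halves instead of an index-by-index Python-level scan.
import Mathlib
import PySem

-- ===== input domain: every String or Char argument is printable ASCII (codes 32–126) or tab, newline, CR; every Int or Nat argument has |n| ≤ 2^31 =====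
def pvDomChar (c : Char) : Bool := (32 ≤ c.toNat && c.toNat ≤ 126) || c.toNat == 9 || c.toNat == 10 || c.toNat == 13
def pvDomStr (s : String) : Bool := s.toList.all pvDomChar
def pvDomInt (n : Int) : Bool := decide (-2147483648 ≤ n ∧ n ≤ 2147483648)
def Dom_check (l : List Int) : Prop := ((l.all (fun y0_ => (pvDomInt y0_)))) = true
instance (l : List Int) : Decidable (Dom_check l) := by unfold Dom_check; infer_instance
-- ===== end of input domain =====

-- B replaces A's recursion on sliced copies l[3:]/l[2:] by a single-offset loop over the original
-- list that compares the two halves as slice equalities (objective: faster, measured).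

-- ===== PORT A =====
-- A recurses on l[3:] / l[2:]; the for-loop returns at the first mismatch, which (since the
-- recursive call does not depend on i) is 'some mismatch exists'.
def check (l : List Int) : Bool :=
  if l.length = 1 ∨ l.length = 0 then true
  else
    let mid := l.length / 2
    if l.length % 2 = 1 then
      if (List.range mid).any (fun i =>
          PySem.List.pyGet? l ((mid + i + 1 : Nat) : Int) != PySem.List.pyGet? l ((i + 1 : Nat) : Int)) then
        check (PySem.List.slice l (some 3) none)
      else false
    else
      if (List.range mid).any (fun i =>
          PySem.List.pyGet? l ((mid + i : Nat) : Int) != PySem.List.pyGet? l ((i : Nat) : Int)) then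
        check (PySem.List.slice l (some 2) none)
      else false
termination_by l.length
decreasing_by
  · simp [PySem.List.slice_some_none, PySem.List.clampIdx]; omega
  · simp [PySem.List.slice_some_none, PySem.List.clampIdx]; omega

-- ===== PORT B =====
def checkAltGo (l : List Int) (start : Nat) : Bool :=
  let n : Int := (l.length : Int) - (start : Int)
  if n ≤ 1 then true
  else
    let mid : Int := PySem.Int.floordiv n 2
    if PySem.Int.mod n 2 = 1 then
      if PySem.List.slice l (some ((start : Int) + 1)) (some ((start : Int) + mid + 1))
           = PySem.List.slice l (some ((start : Int) + mid + 1)) (some ((start : Int) + n)) then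
        false
      else checkAltGo l (start + 3)
    else
      if PySem.List.slice l (some (start : Int)) (some ((start : Int) + mid))
           = PySem.List.slice l (some ((start : Int) + mid)) (some ((start : Int) + n)) then
        false
      else checkAltGo l (start + 2)
termination_by l.length - start
decreasing_by
  · simp at *; omega
  · simp at *; omega

def check_alt (l : List Int) : Bool := checkAltGo l 0

-- ===== PRECONDITION & SPEC =====
def Spec_check (l : List Int) (out : Bool) : Prop := out = check_alt l
instance (l : List Int) (out : Bool) : Decidable (Spec_check l out) := by unfold Spec_check; infer_instance

-- ===== CLAIM (what is proved, stated in full; the proofs are below) =====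
def Claim_equal_check : Prop := ∀ (l : List Int), Dom_check l → Spec_check l (check l)

-- ===== LEMMAS AND PROOFS =====

-- the two half-slices are equal iff every pointwise comparison A performs succeeds
lemma halves_eq_iff (d : List Int) (a mid : Nat) :
    ((d.drop a).take mid = (d.drop (a + mid)).take mid) ↔ ∀ i < mid, d[a + i]? = d[a + mid + i]? := by
  constructor
  · intro he i hi
    have := congrArg (fun t => t[i]?) he
    simpa [List.getElem?_take, List.getElem?_drop, hi, Nat.add_comm] using this
  · intro hp
    apply List.ext_getElem?
    intro k
    by_cases hk : k < mid
    · simpa [List.getElem?_take, List.getElem?_drop, hk, Nat.add_comm] using hp k hk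
    · simp [List.getElem?_take, hk]

-- A's odd branch, phrased over drop/take of the argument list
lemma check_eq_odd (d : List Int) (M : Nat) (h : d.length = 2 * M + 1) (h2 : 1 ≤ M) :
    check d = (if (d.drop 1).take M = (d.drop (1 + M)).take M then false else check (d.drop 3)) := by
  rw [check]
  have h1 : ¬ (d.length = 1 ∨ d.length = 0) := by omega
  have hm : d.length / 2 = M := by omega
  have hp : d.length % 2 = 1 := by omega
  rw [if_neg h1]
  simp only [hm, hp]
  have hs : PySem.List.slice d (some 3) none = d.drop 3 := by
    simp [PySem.List.slice_some_none, PySem.List.clampIdx]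
  rw [hs]
  by_cases he : (d.drop 1).take M = (d.drop (1 + M)).take M
  · have hall := (halves_eq_iff d 1 M).mp he
    have hc : (List.range M).any (fun i =>
        PySem.List.pyGet? d ((M + i + 1 : Nat) : Int) != PySem.List.pyGet? d ((i + 1 : Nat) : Int)) = false := by
      rw [List.any_eq_false]
      intro i hi
      rw [List.mem_range] at hi
      rw [PySem.List.pyGet?_natCast, PySem.List.pyGet?_natCast,
        show M + i + 1 = 1 + M + i from by omega, show i + 1 = 1 + i from by omega]
      simp [hall i hi]
    rw [hc, if_pos he]
    simp
  · have hex : (List.range M).any (fun i =>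
        PySem.List.pyGet? d ((M + i + 1 : Nat) : Int) != PySem.List.pyGet? d ((i + 1 : Nat) : Int)) = true := by
      by_contra hcon
      apply he
      apply (halves_eq_iff d 1 M).mpr
      intro i hi
      have hx := List.any_eq_false.mp (Bool.eq_false_iff.mpr hcon) _ (List.mem_range.mpr hi)
      rw [PySem.List.pyGet?_natCast, PySem.List.pyGet?_natCast,
        show M + i + 1 = 1 + M + i from by omega, show i + 1 = 1 + i from by omega] at hx
      have hq : d[1 + M + i]? = d[1 + i]? := by simpa using hx
      exact hq.symm
    rw [hex, if_neg he]
    simp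

-- A's even branch, phrased over drop/take of the argument list
lemma check_eq_even (d : List Int) (M : Nat) (h : d.length = 2 * M) (h2 : 1 ≤ M) :
    check d = (if d.take M = (d.drop M).take M then false else check (d.drop 2)) := by
  rw [check]
  have h1 : ¬ (d.length = 1 ∨ d.length = 0) := by omega
  have hm : d.length / 2 = M := by omega
  have hp : ¬ d.length % 2 = 1 := by omega
  rw [if_neg h1]
  simp only [hm, if_neg hp]
  have hs : PySem.List.slice d (some 2) none = d.drop 2 := by
    simp [PySem.List.slice_some_none, PySem.List.clampIdx]
  rw [hs]
  have hiff := halves_eq_iff d 0 M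
  simp only [List.drop_zero, Nat.zero_add] at hiff
  by_cases he : d.take M = (d.drop M).take M
  · have hall := hiff.mp he
    have hc : (List.range M).any (fun i =>
        PySem.List.pyGet? d ((M + i : Nat) : Int) != PySem.List.pyGet? d ((i : Nat) : Int)) = false := by
      rw [List.any_eq_false]
      intro i hi
      rw [List.mem_range] at hi
      rw [PySem.List.pyGet?_natCast, PySem.List.pyGet?_natCast]
      simp [hall i hi]
    rw [hc, if_pos he]
    simp
  · have hex : (List.range M).any (fun i =>
        PySem.List.pyGet? d ((M + i : Nat) : Int) != PySem.List.pyGet? d ((i : Nat) : Int)) = true := by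
      by_contra hcon
      apply he
      apply hiff.mpr
      intro i hi
      have hx := List.any_eq_false.mp (Bool.eq_false_iff.mpr hcon) _ (List.mem_range.mpr hi)
      rw [PySem.List.pyGet?_natCast, PySem.List.pyGet?_natCast] at hx
      have hq : d[M + i]? = d[i]? := by simpa using hx
      exact hq.symm
    rw [hex, if_neg he]
    simp

-- B's odd-branch slice comparison, rewritten to the drop/take view of the current segment
lemma sliceB_odd (l : List Int) (start M : Nat) (h : l.length - start = 2 * M + 1)
    (hs : start ≤ l.length) :
    (PySem.List.slice l (some ((start : Int) + 1))
        (some ((start : Int) + PySem.Int.floordiv ((l.length : Int) - (start : Int)) 2 + 1)) =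
      PySem.List.slice l (some ((start : Int) + PySem.Int.floordiv ((l.length : Int) - (start : Int)) 2 + 1))
        (some ((start : Int) + ((l.length : Int) - (start : Int)))))
    ↔ (((l.drop start).drop 1).take M = ((l.drop start).drop (1 + M)).take M) := by
  have hmid : PySem.Int.floordiv ((l.length : Int) - (start : Int)) 2 = (M : Int) := by
    rw [PySem.Int.floordiv_eq_ediv_of_pos (by omega)]
    omega
  have e1 : ((start : Int) + 1) = ((start + 1 : Nat) : Int) := by push_cast; ring
  have e2 : (start : Int) + PySem.Int.floordiv ((l.length : Int) - (start : Int)) 2 + 1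
      = ((start + M + 1 : Nat) : Int) := by rw [hmid]; push_cast; ring
  have e3 : (start : Int) + ((l.length : Int) - (start : Int)) = ((l.length : Nat) : Int) := by
    push_cast; ring
  rw [e1, e2, e3, PySem.List.slice_natCast, PySem.List.slice_natCast,
    show start + M + 1 - (start + 1) = M from by omega,
    show l.length - (start + M + 1) = M from by omega,
    show start + 1 = start + 1 from rfl,
    show start + M + 1 = start + (1 + M) from by omega,
    ← List.drop_drop, ← List.drop_drop]

-- B's even-branch slice comparison, rewritten to the drop/take view of the current segment
lemma sliceB_even (l : List Int) (start M : Nat) (h : l.length - start = 2 * M)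
    (hs : start ≤ l.length) :
    (PySem.List.slice l (some (start : Int))
        (some ((start : Int) + PySem.Int.floordiv ((l.length : Int) - (start : Int)) 2)) =
      PySem.List.slice l (some ((start : Int) + PySem.Int.floordiv ((l.length : Int) - (start : Int)) 2))
        (some ((start : Int) + ((l.length : Int) - (start : Int)))))
    ↔ ((l.drop start).take M = ((l.drop start).drop M).take M) := by
  have hmid : PySem.Int.floordiv ((l.length : Int) - (start : Int)) 2 = (M : Int) := by
    rw [PySem.Int.floordiv_eq_ediv_of_pos (by omega)]
    omega
  have e2 : (start : Int) + PySem.Int.floordiv ((l.length : Int) - (start : Int)) 2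
      = ((start + M : Nat) : Int) := by rw [hmid]; push_cast; ring
  have e3 : (start : Int) + ((l.length : Int) - (start : Int)) = ((l.length : Nat) : Int) := by
    push_cast; ring
  rw [e2, e3, PySem.List.slice_natCast, PySem.List.slice_natCast,
    show start + M - start = M from by omega,
    show l.length - (start + M) = M from by omega,
    show start + M = start + M from rfl,
    ← List.drop_drop]

lemma main_lemma (l : List Int) (start : Nat) :
    checkAltGo l start = check (l.drop start) := by
  induction start using checkAltGo.induct (l := l) with
  | case1 start n hn =>
    rw [checkAltGo, check]
    have hlen : (l.drop start).length = l.length - start := List.length_drop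
    have hn' : ((l.length : Int) - (start : Int)) ≤ 1 := hn
    have h1 : (l.drop start).length = 1 ∨ (l.drop start).length = 0 := by omega
    rw [if_pos hn, if_pos h1]
  | case2 start n hn mid hodd heq =>
    have hn' : ¬ ((l.length : Int) - (start : Int) ≤ 1) := hn
    have hodd' : PySem.Int.mod ((l.length : Int) - (start : Int)) 2 = 1 := hodd
    rw [PySem.Int.mod_eq_emod_of_pos (by omega)] at hodd'
    have hM : l.length - start = 2 * ((l.length - start) / 2) + 1 := by omega
    have hlen : (l.drop start).length = 2 * ((l.length - start) / 2) + 1 := by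
      rw [List.length_drop]; omega
    rw [checkAltGo, if_neg hn, if_pos hodd, if_pos heq,
      check_eq_odd (l.drop start) ((l.length - start) / 2) hlen (by omega)]
    have hc := (sliceB_odd l start ((l.length - start) / 2) hM (by omega)).mp heq
    rw [if_pos hc]
  | case3 start n hn mid hodd heq ih =>
    have hn' : ¬ ((l.length : Int) - (start : Int) ≤ 1) := hn
    have hodd' : PySem.Int.mod ((l.length : Int) - (start : Int)) 2 = 1 := hodd
    rw [PySem.Int.mod_eq_emod_of_pos (by omega)] at hodd'
    have hM : l.length - start = 2 * ((l.length - start) / 2) + 1 := by omega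
    have hlen : (l.drop start).length = 2 * ((l.length - start) / 2) + 1 := by
      rw [List.length_drop]; omega
    rw [checkAltGo, if_neg hn, if_pos hodd, if_neg heq, ih,
      check_eq_odd (l.drop start) ((l.length - start) / 2) hlen (by omega)]
    have hc := heq ∘ (sliceB_odd l start ((l.length - start) / 2) hM (by omega)).mpr
    rw [if_neg hc, List.drop_drop, Nat.add_comm start 3]
  | case4 start n hn mid hodd heq =>
    have hn' : ¬ ((l.length : Int) - (start : Int) ≤ 1) := hn
    have hodd' : ¬ PySem.Int.mod ((l.length : Int) - (start : Int)) 2 = 1 := hodd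
    rw [PySem.Int.mod_eq_emod_of_pos (by omega)] at hodd'
    have hM : l.length - start = 2 * ((l.length - start) / 2) := by omega
    have hlen : (l.drop start).length = 2 * ((l.length - start) / 2) := by
      rw [List.length_drop]; omega
    rw [checkAltGo, if_neg hn, if_neg hodd, if_pos heq,
      check_eq_even (l.drop start) ((l.length - start) / 2) hlen (by omega)]
    have hc := (sliceB_even l start ((l.length - start) / 2) hM (by omega)).mp heq
    rw [if_pos hc]
  | case5 start n hn mid hodd heq ih =>
    have hn' : ¬ ((l.length : Int) - (start : Int) ≤ 1) := hn
    have hodd' : ¬ PySem.Int.mod ((l.length : Int) - (start : Int)) 2 = 1 := hodd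
    rw [PySem.Int.mod_eq_emod_of_pos (by omega)] at hodd'
    have hM : l.length - start = 2 * ((l.length - start) / 2) := by omega
    have hlen : (l.drop start).length = 2 * ((l.length - start) / 2) := by
      rw [List.length_drop]; omega
    rw [checkAltGo, if_neg hn, if_neg hodd, if_neg heq, ih,
      check_eq_even (l.drop start) ((l.length - start) / 2) hlen (by omega)]
    have hc := heq ∘ (sliceB_even l start ((l.length - start) / 2) hM (by omega)).mpr
    rw [if_neg hc, List.drop_drop, Nat.add_comm start 2]

-- ===== VERDICT (by name: the statement is the Claim_ definition above) =====
theorem check_spec : Claim_equal_check := by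
  intro l _
  unfold Spec_check check_alt
  simpa using (main_lemma l 0).symm
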